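-- pv_equiv track=rewrite | github.com/davearussell/advent2015 | day5/solve.py | is_really_nice
-- ===== SOURCE A (Python) =====
-- def is_really_nice(word):
--     pairs = {}
--     has_xyx = False
--     has_repeat = False
--     for i, char in enumerate(word):
--         if i >= 2 and char == word[i - 2]:
--             has_xyx = True
--         if i >= 1:
--             pair = word[i-1:i+1]
--             l = pairs.setdefault(pair, [])
--             l.append(i)
--             if len(l) > 2 or len(l) == 2 and l[0] < i - 1:
--                 has_repeat = True
--     return has_xyx and has_repeat
-- ===== SOURCE B (Python) =====
-- def is_really_nice(word):
--     has_xyx = any(word[i] == word[i + 2] for i in range(len(word) - 2))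
--     has_repeat = any(word[i:i + 2] in word[i + 2:] for i in range(len(word) - 1))
--     return has_xyx and has_repeat
-- ===== Notes on version B (the rewrite author's own statement) =====
-- stated objective: idiomatic
-- what changed: Replaced A's single pass that maintains a dict from each pair to the list of its end positions (with length/first-index tests) by two independent any() passes: a direct xyx scan and a substring search of each pair in the rest of the string.
import Mathlib
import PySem

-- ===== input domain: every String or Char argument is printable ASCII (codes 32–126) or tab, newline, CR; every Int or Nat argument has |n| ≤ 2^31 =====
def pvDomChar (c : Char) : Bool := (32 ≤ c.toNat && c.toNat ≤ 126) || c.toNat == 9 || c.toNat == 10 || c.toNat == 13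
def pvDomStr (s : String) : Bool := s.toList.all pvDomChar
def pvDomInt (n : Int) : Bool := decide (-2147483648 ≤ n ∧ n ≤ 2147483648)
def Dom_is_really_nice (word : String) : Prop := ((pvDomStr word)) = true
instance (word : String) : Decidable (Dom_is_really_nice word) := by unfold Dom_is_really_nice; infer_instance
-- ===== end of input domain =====

-- B replaces A's position-dict single pass by two idiomatic any() scans (xyx check + pair-in-suffix search); same return value.

-- ===== PORT A =====
-- one loop iteration of A: state is (pairs dict, has_xyx, has_repeat)
def isReallyNiceStepA (cs : List Char)
    (s : PySem.Dict (List Char) (List Int) × Bool × Bool) (ic : Int × Char) :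
    PySem.Dict (List Char) (List Int) × Bool × Bool :=
  let pairs := s.1
  let has_xyx := s.2.1
  let has_repeat := s.2.2
  let i := ic.1
  let char := ic.2
  -- if i >= 2 and char == word[i - 2]: has_xyx = True
  let has_xyx := if 2 ≤ i ∧ PySem.List.pyGet? cs (i - 2) = some char then true else has_xyx
  if 1 ≤ i then
    -- pair = word[i-1:i+1]; l = pairs.setdefault(pair, []); l.append(i)
    let pair := PySem.List.slice cs (some (i - 1)) (some (i + 1))
    let l := pairs.getD pair [] ++ [i]
    let pairs := pairs.insert pair l
    -- if len(l) > 2 or len(l) == 2 and l[0] < i - 1: has_repeat = True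
    let has_repeat := if 2 < l.length ∨ (l.length = 2 ∧ PySem.List.pyGetD l 0 0 < i - 1)
      then true else has_repeat
    (pairs, has_xyx, has_repeat)
  else
    (pairs, has_xyx, has_repeat)

def isReallyNiceCoreA (cs : List Char) : Bool :=
  let r := (PySem.List.enumerate cs 0).foldl (isReallyNiceStepA cs) (PySem.Dict.empty, false, false)
  r.2.1 && r.2.2

def is_really_nice (word : String) : Bool :=
  isReallyNiceCoreA word.toList

-- ===== PORT B =====
def isReallyNiceCoreB (cs : List Char) : Bool :=
  -- has_xyx = any(word[i] == word[i + 2] for i in range(len(word) - 2))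
  let has_xyx := (PySem.List.pyRange 0 ((cs.length : Int) - 2) 1).any
    (fun i => PySem.List.pyGetD cs i 'a' == PySem.List.pyGetD cs (i + 2) 'a')
  -- has_repeat = any(word[i:i + 2] in word[i + 2:] for i in range(len(word) - 1))
  let has_repeat := (PySem.List.pyRange 0 ((cs.length : Int) - 1) 1).any
    (fun i => PySem.Chars.isIn (PySem.List.slice cs (some i) (some (i + 2)))
                               (PySem.List.slice cs (some (i + 2)) none))
  has_xyx && has_repeat

def is_really_nice_alt (word : String) : Bool :=
  isReallyNiceCoreB word.toList

-- ===== PRECONDITION & SPEC =====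
def Spec_is_really_nice (word : String) (out : Bool) : Prop := out = is_really_nice_alt word
instance (word : String) (out : Bool) : Decidable (Spec_is_really_nice word out) := by unfold Spec_is_really_nice; infer_instance

-- ===== CLAIM (what is proved, stated in full; the proofs are below) =====
def Claim_equal_is_really_nice : Prop := ∀ (word : String), Dom_is_really_nice word → Spec_is_really_nice word (is_really_nice word)

-- ===== LEMMAS AND PROOFS =====

-- canonical forms of the two conditions
def PX (cs : List Char) : Prop := ∃ k, k + 2 < cs.length ∧ cs.getD k 'a' = cs.getD (k + 2) 'a'
def PR (cs : List Char) : Prop := ∃ j k, j + 2 ≤ k ∧ k + 1 < cs.length ∧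
  cs.getD j 'a' = cs.getD k 'a' ∧ cs.getD (j + 1) 'a' = cs.getD (k + 1) 'a'

lemma take_two_drop (cs : List Char) (m : Nat) (h : m + 1 < cs.length) :
    (cs.drop m).take 2 = [cs.getD m 'a', cs.getD (m + 1) 'a'] := by
  have hm : m < cs.length := by omega
  rw [List.drop_eq_getElem_cons hm, List.drop_eq_getElem_cons (l := cs) h]
  rw [List.take_succ_cons, List.take_succ_cons, List.take_zero]
  simp [List.getD_eq_getElem?_getD, hm, h]

lemma slice_pair_eq (cs : List Char) (i : Nat) (h1 : 1 ≤ i) (h2 : i < cs.length) :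
    PySem.List.slice cs (some ((i : Int) - 1)) (some ((i : Int) + 1)) =
      [cs.getD (i - 1) 'a', cs.getD i 'a'] := by
  have e1 : (i : Int) - 1 = ((i - 1 : Nat) : Int) := by omega
  have e2 : (i : Int) + 1 = ((i + 1 : Nat) : Int) := by omega
  rw [e1, e2, PySem.List.slice_natCast]
  have h3 : i + 1 - (i - 1) = 2 := by omega
  have h4 : i - 1 + 1 = i := by omega
  rw [h3, take_two_drop cs (i - 1) (by omega), h4]

lemma pair_prefix_drop_iff (cs : List Char) (a b : Char) (q : Nat) :
    ([a, b] <+: cs.drop q) ↔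
      (q + 1 < cs.length ∧ cs.getD q 'a' = a ∧ cs.getD (q + 1) 'a' = b) := by
  constructor
  · intro hp
    have hlen : q + 1 < cs.length := by
      have := hp.length_le; simp at this; omega
    have h2 := List.prefix_iff_eq_take.mp hp
    have hl2 : [a, b].length = 2 := rfl
    rw [hl2, take_two_drop cs q hlen] at h2
    simp only [List.cons.injEq, and_true] at h2
    exact ⟨hlen, h2.1.symm, h2.2.symm⟩
  · rintro ⟨hlen, ha, hb⟩
    rw [List.prefix_iff_eq_take]
    have hl2 : [a, b].length = 2 := rfl
    rw [hl2, take_two_drop cs q hlen, ha, hb]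

lemma isIn_suffix_iff (cs : List Char) (j : Nat) (hj : j + 1 < cs.length) :
    PySem.Chars.isIn ((cs.drop j).take 2) (cs.drop (j + 2)) = true ↔
      ∃ k, j + 2 ≤ k ∧ k + 1 < cs.length ∧
        cs.getD j 'a' = cs.getD k 'a' ∧ cs.getD (j + 1) 'a' = cs.getD (k + 1) 'a' := by
  rw [← PySem.Chars.exists_prefix_drop_iff_isIn]
  rw [take_two_drop cs j hj]
  constructor
  · rintro ⟨m, hm⟩
    rw [List.drop_drop] at hm
    obtain ⟨h1, h2, h3⟩ := (pair_prefix_drop_iff cs _ _ _).mp hm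
    exact ⟨j + 2 + m, by omega, h1, h2.symm, h3.symm⟩
  · rintro ⟨k, hk1, hk2, hk3, hk4⟩
    refine ⟨k - (j + 2), ?_⟩
    rw [List.drop_drop]
    have : j + 2 + (k - (j + 2)) = k := by omega
    rw [this]
    exact (pair_prefix_drop_iff cs _ _ _).mpr ⟨hk2, hk3.symm, hk4.symm⟩

lemma bXyx (cs : List Char) :
    ((PySem.List.pyRange 0 ((cs.length : Int) - 2) 1).any
      (fun i => PySem.List.pyGetD cs i 'a' == PySem.List.pyGetD cs (i + 2) 'a')) = true ↔ PX cs := by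
  rw [List.any_eq_true]
  constructor
  · rintro ⟨i, hmem, hf⟩
    rw [PySem.List.mem_pyRange_one] at hmem
    obtain ⟨h0, h1⟩ := hmem
    refine ⟨i.toNat, by omega, ?_⟩
    have e1 : i = ((i.toNat : Nat) : Int) := by omega
    have e2 : ((i.toNat : Nat) : Int) + 2 = ((i.toNat + 2 : Nat) : Int) := by omega
    rw [e1, e2, PySem.List.pyGetD_natCast, PySem.List.pyGetD_natCast, beq_iff_eq] at hf
    exact hf
  · rintro ⟨k, hk, he⟩
    refine ⟨(k : Int), ?_, ?_⟩
    · rw [PySem.List.mem_pyRange_one]; omega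
    · have e2 : (k : Int) + 2 = ((k + 2 : Nat) : Int) := by omega
      rw [e2, PySem.List.pyGetD_natCast, PySem.List.pyGetD_natCast, beq_iff_eq]
      exact he

lemma bRep (cs : List Char) :
    ((PySem.List.pyRange 0 ((cs.length : Int) - 1) 1).any
      (fun i => PySem.Chars.isIn (PySem.List.slice cs (some i) (some (i + 2)))
                                 (PySem.List.slice cs (some (i + 2)) none))) = true ↔ PR cs := by
  rw [List.any_eq_true]
  constructor
  · rintro ⟨i, hmem, hf⟩
    rw [PySem.List.mem_pyRange_one] at hmem
    obtain ⟨h0, h1⟩ := hmem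
    set j := i.toNat with hj
    have e1 : i = ((j : Nat) : Int) := by omega
    have e2 : ((j : Nat) : Int) + 2 = ((j + 2 : Nat) : Int) := by omega
    rw [e1, e2, PySem.List.slice_natCast, PySem.List.slice_from_natCast] at hf
    have hjl : j + 1 < cs.length := by omega
    have h2 : j + 2 - j = 2 := by omega
    rw [h2] at hf
    obtain ⟨k, hk⟩ := (isIn_suffix_iff cs j hjl).mp hf
    exact ⟨j, k, hk⟩
  · rintro ⟨j, k, hk1, hk2, hk3, hk4⟩
    refine ⟨(j : Int), ?_, ?_⟩
    · rw [PySem.List.mem_pyRange_one]; omega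
    · have e2 : ((j : Nat) : Int) + 2 = ((j + 2 : Nat) : Int) := by omega
      rw [e2, PySem.List.slice_natCast, PySem.List.slice_from_natCast]
      have h2 : j + 2 - j = 2 := by omega
      rw [h2]
      exact (isIn_suffix_iff cs j (by omega)).mpr ⟨k, hk1, hk2, hk3, hk4⟩

-- A-side notions: the pair ending at index i, and the list of pair end positions A's dict stores
def pairAt (cs : List Char) (i : Nat) : List Char :=
  PySem.List.slice cs (some ((i : Int) - 1)) (some ((i : Int) + 1))

def occList (cs : List Char) (n : Nat) (p : List Char) : List Int :=
  ((List.range n).filter (fun i => decide (1 ≤ i) && decide (pairAt cs i = p))).map Int.ofNat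

def pxN (cs : List Char) (n : Nat) : Prop :=
  ∃ i, i < n ∧ 2 ≤ i ∧ cs.getD (i - 2) 'a' = cs.getD i 'a'

def prN (cs : List Char) (n : Nat) : Prop :=
  ∃ i, i < n ∧ ∃ o, 1 ≤ o ∧ o + 2 ≤ i ∧ pairAt cs o = pairAt cs i

-- the fired condition at step n equals the existence of a matching pair ending at distance ≥ 2
lemma fired_iff (cs : List Char) (n : Nat) :
    (2 < (occList cs n (pairAt cs n) ++ [(n : Int)]).length ∨
      ((occList cs n (pairAt cs n) ++ [(n : Int)]).length = 2 ∧
        PySem.List.pyGetD (occList cs n (pairAt cs n) ++ [(n : Int)]) 0 0 < (n : Int) - 1)) ↔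
    ∃ o, 1 ≤ o ∧ o + 2 ≤ n ∧ pairAt cs o = pairAt cs n := by
  unfold occList
  set g := fun i => decide (1 ≤ i) && decide (pairAt cs i = pairAt cs n) with hg
  have hmem : ∀ o, o ∈ (List.range n).filter g ↔ (o < n ∧ 1 ≤ o ∧ pairAt cs o = pairAt cs n) := by
    intro o
    simp [hg, List.mem_filter, List.mem_range]
  rcases hocc : (List.range n).filter g with _ | ⟨o1, rest⟩
  · simp only [List.map_nil, List.nil_append, List.length_cons, List.length_nil]
    constructor
    · rintro (h | ⟨h, _⟩) <;> omega
    · rintro ⟨o, h1, h2, h3⟩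
      exfalso
      have : o ∈ (List.range n).filter g := (hmem o).mpr ⟨by omega, h1, h3⟩
      rw [hocc] at this
      simp at this
  · have ho1 : o1 < n ∧ 1 ≤ o1 ∧ pairAt cs o1 = pairAt cs n := by
      rw [← hmem]; rw [hocc]; exact List.mem_cons_self
    rcases hrest : rest with _ | ⟨o2, rest2⟩
    · subst hrest
      simp only [List.map_cons, List.map_nil, List.cons_append, List.nil_append,
        List.length_cons, List.length_nil, PySem.List.pyGetD_zero_cons, Int.ofNat_eq_natCast]
      constructor
      · rintro (h | ⟨-, h⟩)
        · omega
        · exact ⟨o1, ho1.2.1, by omega, ho1.2.2⟩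
      · rintro ⟨o, h1, h2, h3⟩
        have : o ∈ (List.range n).filter g := (hmem o).mpr ⟨by omega, h1, h3⟩
        rw [hocc] at this
        simp at this
        subst this
        exact Or.inr ⟨trivial, by omega⟩
    · subst hrest
      have hpw : ((List.range n).filter g).Pairwise (· < ·) :=
        (List.pairwise_lt_range).filter g
      rw [hocc] at hpw
      have h12 : o1 < o2 := by
        have := List.pairwise_cons.mp hpw
        exact this.1 o2 List.mem_cons_self
      have ho2 : o2 < n := by
        have : o2 ∈ (List.range n).filter g := by rw [hocc]; simp
        exact ((hmem o2).mp this).1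
      constructor
      · rintro -
        exact ⟨o1, ho1.2.1, by omega, ho1.2.2⟩
      · rintro -
        left
        simp

lemma occList_zero (cs : List Char) (p : List Char) : occList cs 0 p = [] := by
  simp [occList]

lemma occList_succ (cs : List Char) (n : Nat) (p : List Char) :
    occList cs (n + 1) p =
      occList cs n p ++ (if 1 ≤ n ∧ pairAt cs n = p then [(n : Int)] else []) := by
  unfold occList
  rw [List.range_succ, List.filter_append, List.map_append]
  congr 1
  by_cases h1 : 1 ≤ n <;> by_cases h2 : pairAt cs n = p <;> simp [h1, h2]

-- one step of A's loop, written out on an arbitrary state (definitional)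
lemma stepA_eq (cs : List Char) (s : PySem.Dict (List Char) (List Int) × Bool × Bool)
    (i : Int) (char : Char) :
    isReallyNiceStepA cs s (i, char) =
      (let x' := if 2 ≤ i ∧ PySem.List.pyGet? cs (i - 2) = some char then true else s.2.1;
       if 1 ≤ i then
         (s.1.insert (PySem.List.slice cs (some (i - 1)) (some (i + 1)))
            (s.1.getD (PySem.List.slice cs (some (i - 1)) (some (i + 1))) [] ++ [i]),
          x',
          if 2 < (s.1.getD (PySem.List.slice cs (some (i - 1)) (some (i + 1))) [] ++ [i]).length ∨
              ((s.1.getD (PySem.List.slice cs (some (i - 1)) (some (i + 1))) [] ++ [i]).length = 2 ∧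
                PySem.List.pyGetD (s.1.getD (PySem.List.slice cs (some (i - 1)) (some (i + 1))) [] ++ [i]) 0 0 < i - 1)
            then true else s.2.2)
       else (s.1, x', s.2.2)) := rfl

lemma px_step (cs : List Char) (n : Nat) :
    pxN cs (n + 1) ↔ pxN cs n ∨ (2 ≤ n ∧ cs.getD (n - 2) 'a' = cs.getD n 'a') := by
  unfold pxN
  constructor
  · rintro ⟨i, h1, h2, h3⟩
    by_cases hi : i < n
    · exact Or.inl ⟨i, hi, h2, h3⟩
    · have : i = n := by omega
      subst this
      exact Or.inr ⟨h2, h3⟩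
  · rintro (⟨i, h1, h2, h3⟩ | ⟨h2, h3⟩)
    · exact ⟨i, by omega, h2, h3⟩
    · exact ⟨n, by omega, h2, h3⟩

lemma pr_step (cs : List Char) (n : Nat) :
    prN cs (n + 1) ↔ prN cs n ∨ ∃ o, 1 ≤ o ∧ o + 2 ≤ n ∧ pairAt cs o = pairAt cs n := by
  unfold prN
  constructor
  · rintro ⟨i, h1, ho⟩
    by_cases hi : i < n
    · exact Or.inl ⟨i, hi, ho⟩
    · have : i = n := by omega
      subst this
      exact Or.inr ho
  · rintro (⟨i, h1, ho⟩ | ho)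
    · exact ⟨i, by omega, ho⟩
    · exact ⟨n, by omega, ho⟩

-- the loop invariant of A's single pass, over the prefix of length n
lemma foldA_inv (cs : List Char) (n : Nat) (hn : n ≤ cs.length) :
    (∀ p, ((PySem.List.enumerate (cs.take n) 0).foldl (isReallyNiceStepA cs)
        (PySem.Dict.empty, false, false)).1.getD p [] = occList cs n p) ∧
    (((PySem.List.enumerate (cs.take n) 0).foldl (isReallyNiceStepA cs)
        (PySem.Dict.empty, false, false)).2.1 = true ↔ pxN cs n) ∧
    (((PySem.List.enumerate (cs.take n) 0).foldl (isReallyNiceStepA cs)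
        (PySem.Dict.empty, false, false)).2.2 = true ↔ prN cs n) := by
  induction n with
  | zero =>
    refine ⟨fun p => ?_, ?_, ?_⟩
    · simp [occList_zero, PySem.Dict.getD_empty]
    · simp only [List.take_zero, PySem.List.enumerate_nil, List.foldl_nil]
      constructor
      · intro h; exact absurd h (by simp)
      · rintro ⟨i, h, -⟩; omega
    · simp only [List.take_zero, PySem.List.enumerate_nil, List.foldl_nil]
      constructor
      · intro h; exact absurd h (by simp)
      · rintro ⟨i, h, -⟩; omega
  | succ n ih =>
    have hn' : n ≤ cs.length := by omega
    have hnl : n < cs.length := by omega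
    obtain ⟨ihd, ihx, ihr⟩ := ih hn'
    have htake : cs.take (n + 1) = cs.take n ++ [cs.getD n 'a'] := by
      rw [List.take_succ, List.getElem?_eq_getElem hnl]
      simp [List.getD_eq_getElem?_getD, List.getElem?_eq_getElem hnl]
    rw [htake, PySem.List.enumerate_append, List.foldl_append]
    have hlen : (0 : Int) + ((cs.take n).length : Int) = (n : Int) := by
      simp [List.length_take, Nat.min_eq_left hn']
    rw [hlen, PySem.List.enumerate_cons, PySem.List.enumerate_nil, List.foldl_cons,
      List.foldl_nil, stepA_eq]
    have hpair : PySem.List.slice cs (some ((n : Int) - 1)) (some ((n : Int) + 1)) = pairAt cs n := rfl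
    rw [hpair]
    set F := (PySem.List.enumerate (cs.take n) 0).foldl (isReallyNiceStepA cs)
        (PySem.Dict.empty, false, false) with hF
    have hgn : cs.getD n 'a' = cs[n] := by
      simp [List.getD_eq_getElem?_getD, List.getElem?_eq_getElem hnl]
    have hxcond : (2 ≤ (n : Int) ∧ PySem.List.pyGet? cs ((n : Int) - 2) = some (cs.getD n 'a')) ↔
        (2 ≤ n ∧ cs.getD (n - 2) 'a' = cs.getD n 'a') := by
      constructor
      · rintro ⟨h2, hget⟩
        have h2' : 2 ≤ n := by omega
        have hgn2 : cs.getD (n - 2) 'a' = cs[n - 2]'(by omega) := by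
          simp [List.getD_eq_getElem?_getD, List.getElem?_eq_getElem (show n - 2 < cs.length by omega)]
        have e : (n : Int) - 2 = ((n - 2 : Nat) : Int) := by omega
        rw [e, PySem.List.pyGet?_natCast, List.getElem?_eq_getElem (by omega)] at hget
        simp only [Option.some.injEq] at hget
        exact ⟨h2', hgn2.trans hget⟩
      · rintro ⟨h2, heq⟩
        have hgn2 : cs.getD (n - 2) 'a' = cs[n - 2]'(by omega) := by
          simp [List.getD_eq_getElem?_getD, List.getElem?_eq_getElem (show n - 2 < cs.length by omega)]
        have e : (n : Int) - 2 = ((n - 2 : Nat) : Int) := by omega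
        refine ⟨by omega, ?_⟩
        rw [e, PySem.List.pyGet?_natCast, List.getElem?_eq_getElem (by omega)]
        rw [hgn2] at heq
        rw [heq]
    have hx : ((if 2 ≤ (n : Int) ∧ PySem.List.pyGet? cs ((n : Int) - 2) = some (cs.getD n 'a')
          then true else F.2.1) = true) ↔ pxN cs (n + 1) := by
      rw [px_step]
      by_cases hc : 2 ≤ n ∧ cs.getD (n - 2) 'a' = cs.getD n 'a'
      · rw [if_pos (hxcond.mpr hc)]
        exact ⟨fun _ => Or.inr hc, fun _ => rfl⟩
      · rw [if_neg (fun h => hc (hxcond.mp h)), ihx]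
        constructor
        · exact Or.inl
        · rintro (h | h)
          · exact h
          · exact absurd h hc
    by_cases hn1 : (1 : Int) ≤ (n : Int)
    · rw [if_pos hn1]
      have hn1' : 1 ≤ n := by omega
      refine ⟨fun p => ?_, hx, ?_⟩
      · rw [ihd, PySem.Dict.getD_insert, occList_succ]
        by_cases hp : p = pairAt cs n
        · subst hp
          rw [if_pos rfl, if_pos ⟨hn1', rfl⟩]
        · rw [if_neg hp, if_neg (fun h => hp h.2.symm), List.append_nil, ihd]
      · rw [ihd, pr_step]
        by_cases hc : ∃ o, 1 ≤ o ∧ o + 2 ≤ n ∧ pairAt cs o = pairAt cs n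
        · rw [if_pos ((fired_iff cs n).mpr hc)]
          exact ⟨fun _ => Or.inr hc, fun _ => rfl⟩
        · rw [if_neg (fun h => hc ((fired_iff cs n).mp h)), ihr]
          constructor
          · exact Or.inl
          · rintro (h | h)
            · exact h
            · exact absurd h hc
    · rw [if_neg hn1]
      have hn0 : n = 0 := by omega
      subst hn0
      refine ⟨fun p => ?_, hx, ?_⟩
      · rw [ihd, occList_succ, if_neg (by omega), List.append_nil]
      · rw [ihr, pr_step]
        constructor
        · exact Or.inl
        · rintro (h | ⟨o, h1, h2, -⟩)
          · exact h
          · omega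

lemma pairAt_eq_iff (cs : List Char) (o i : Nat) (ho1 : 1 ≤ o) (ho2 : o < cs.length)
    (hi1 : 1 ≤ i) (hi2 : i < cs.length) :
    pairAt cs o = pairAt cs i ↔
      (cs.getD (o - 1) 'a' = cs.getD (i - 1) 'a' ∧ cs.getD o 'a' = cs.getD i 'a') := by
  unfold pairAt
  rw [slice_pair_eq cs o ho1 ho2, slice_pair_eq cs i hi1 hi2]
  simp

lemma pxN_iff_PX (cs : List Char) : pxN cs cs.length ↔ PX cs := by
  unfold pxN PX
  constructor
  · rintro ⟨i, h1, h2, h3⟩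
    refine ⟨i - 2, by omega, ?_⟩
    have e : i - 2 + 2 = i := by omega
    rw [e]
    exact h3
  · rintro ⟨k, h1, h2⟩
    refine ⟨k + 2, by omega, by omega, ?_⟩
    have e : k + 2 - 2 = k := by omega
    rw [e]
    exact h2

lemma prN_iff_PR (cs : List Char) : prN cs cs.length ↔ PR cs := by
  unfold prN PR
  constructor
  · rintro ⟨i, h1, o, h2, h3, h4⟩
    rw [pairAt_eq_iff cs o i h2 (by omega) (by omega) h1] at h4
    refine ⟨o - 1, i - 1, by omega, by omega, h4.1, ?_⟩
    have e1 : o - 1 + 1 = o := by omega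
    have e2 : i - 1 + 1 = i := by omega
    rw [e1, e2]
    exact h4.2
  · rintro ⟨j, k, h1, h2, h3, h4⟩
    refine ⟨k + 1, by omega, j + 1, by omega, by omega, ?_⟩
    rw [pairAt_eq_iff cs (j + 1) (k + 1) (by omega) (by omega) (by omega) h2]
    constructor
    · simpa using h3
    · simpa using h4

lemma core_eq (cs : List Char) : isReallyNiceCoreA cs = isReallyNiceCoreB cs := by
  have h := foldA_inv cs cs.length le_rfl
  rw [List.take_length] at h
  show (((PySem.List.enumerate cs 0).foldl (isReallyNiceStepA cs)
      (PySem.Dict.empty, false, false)).2.1 &&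
    ((PySem.List.enumerate cs 0).foldl (isReallyNiceStepA cs)
      (PySem.Dict.empty, false, false)).2.2) =
    ((PySem.List.pyRange 0 ((cs.length : Int) - 2) 1).any
      (fun i => PySem.List.pyGetD cs i 'a' == PySem.List.pyGetD cs (i + 2) 'a') &&
    (PySem.List.pyRange 0 ((cs.length : Int) - 1) 1).any
      (fun i => PySem.Chars.isIn (PySem.List.slice cs (some i) (some (i + 2)))
                                 (PySem.List.slice cs (some (i + 2)) none)))
  have e1 := (h.2.1.trans (pxN_iff_PX cs)).trans (bXyx cs).symm
  have e2 := (h.2.2.trans (prN_iff_PR cs)).trans (bRep cs).symm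
  rw [Bool.eq_iff_iff.mpr e1, Bool.eq_iff_iff.mpr e2]

-- ===== VERDICT (by name: the statement is the Claim_ definition above) =====
theorem is_really_nice_spec : Claim_equal_is_really_nice := by
  intro word _
  unfold Spec_is_really_nice is_really_nice is_really_nice_alt
  exact core_eq word.toList
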